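-- pv_equiv track=rewrite | github.com/MrBrantCode/unitest_baseline | mut_generate/mist_train_cf/cf_96556/solution.py | sum_of_even_numbers
-- ===== SOURCE A (Python) =====
-- def sum_of_even_numbers(n):
--     sum = 0
--     count = 0
--     num = 2
--
--     while count < n:
--         if num % 4 != 0:
--             sum += num
--             count += 1
--         num += 2
--
--     return sum
-- ===== SOURCE B (Python) =====
-- def sum_of_even_numbers(n):
--     # Closed form: the numbers taken are 2, 6, 10, ... (i.e. 4*i+2), and the
--     # sum of the first n of them is 2*n*n.
--     return 2 * n * n if n > 0 else 0
-- ===== Notes on version B (the rewrite author's own statement) =====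
-- stated objective: faster
-- what changed: Replaced the O(n) even-number filtering loop with the closed form 2*n*n for the sum of the arithmetic series 2,6,10,...
import Mathlib
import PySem

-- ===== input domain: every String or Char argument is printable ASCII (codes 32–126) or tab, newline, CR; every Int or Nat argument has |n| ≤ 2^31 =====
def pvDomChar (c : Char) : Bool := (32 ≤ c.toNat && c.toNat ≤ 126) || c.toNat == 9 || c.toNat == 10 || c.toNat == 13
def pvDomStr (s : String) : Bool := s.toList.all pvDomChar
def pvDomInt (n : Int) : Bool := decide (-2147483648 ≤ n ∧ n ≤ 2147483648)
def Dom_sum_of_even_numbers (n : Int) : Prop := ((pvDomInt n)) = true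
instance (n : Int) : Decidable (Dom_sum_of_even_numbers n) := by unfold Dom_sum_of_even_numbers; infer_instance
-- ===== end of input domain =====

-- B replaces A's O(n) filtering loop by the closed form 2*n*n (faster, asymptotic).

-- ===== PORT A =====
-- literal port of A's while loop; state (sum, count, num); terminates because
-- each iteration strictly decreases 2*(n-count) + (1 if num % 4 == 0 else 0)
def sum_of_even_numbers_loop (n sum count num : Int) : Int :=
  if count < n then
    if num % 4 ≠ 0 then
      sum_of_even_numbers_loop n (sum + num) (count + 1) (num + 2)
    else
      sum_of_even_numbers_loop n sum count (num + 2)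
  else sum
termination_by (2 * (n - count) + (if num % 4 = 0 then 1 else 0)).toNat
decreasing_by all_goals split_ifs <;> omega

def sum_of_even_numbers (n : Int) : Int :=
  sum_of_even_numbers_loop n 0 0 2

-- ===== PORT B =====
def sum_of_even_numbers_alt (n : Int) : Int :=
  if n > 0 then 2 * n * n else 0

-- ===== PRECONDITION & SPEC =====
def Spec_sum_of_even_numbers (n : Int) (out : Int) : Prop := out = sum_of_even_numbers_alt n
instance (n : Int) (out : Int) : Decidable (Spec_sum_of_even_numbers n out) := by unfold Spec_sum_of_even_numbers; infer_instance

-- ===== CLAIM (what is proved, stated in full; the proofs are below) =====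
def Claim_equal_sum_of_even_numbers : Prop := ∀ (n : Int), Dom_sum_of_even_numbers n → Spec_sum_of_even_numbers n (sum_of_even_numbers n)

-- ===== LEMMAS AND PROOFS =====

-- loop invariant: at the 'num ≡ 2 (mod 4)' states, num = 4*count+2 and sum = 2*count²
theorem sum_of_even_numbers_loop_eq (n : Int) (c : Int) (h : c ≤ n) :
    sum_of_even_numbers_loop n (2 * c * c) c (4 * c + 2) = 2 * n * n := by
  by_cases hlt : c < n
  · have h1 : (4 * c + 2) % 4 ≠ 0 := by omega
    rw [sum_of_even_numbers_loop, if_pos hlt, if_pos h1]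
    by_cases hlt2 : c + 1 < n
    · have h0 : (4 * c + 2 + 2) % 4 = 0 := by omega
      rw [sum_of_even_numbers_loop, if_pos hlt2, if_neg (by simpa using h0)]
      have := sum_of_even_numbers_loop_eq n (c + 1) (by omega)
      have e1 : 2 * c * c + (4 * c + 2) = 2 * (c + 1) * (c + 1) := by ring
      have e2 : 4 * c + 2 + 2 + 2 = 4 * (c + 1) + 2 := by ring
      rw [e1, e2, this]
    · have hn : c + 1 = n := by omega
      have h0 : (4 * c + 2 + 2) % 4 = 0 := by omega
      rw [sum_of_even_numbers_loop, if_neg hlt2]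
      subst hn; ring
  · have hn : c = n := by omega
    rw [sum_of_even_numbers_loop, if_neg hlt]
    subst hn; rfl
termination_by (n - c).toNat
decreasing_by omega

-- ===== VERDICT (by name: the statement is the Claim_ definition above) =====
theorem sum_of_even_numbers_spec : Claim_equal_sum_of_even_numbers := by
  intro n _
  unfold Spec_sum_of_even_numbers sum_of_even_numbers sum_of_even_numbers_alt
  by_cases h : n > 0
  · rw [if_pos h]
    have := sum_of_even_numbers_loop_eq n 0 (by omega)
    simpa using this
  · rw [if_neg h, sum_of_even_numbers_loop, if_neg (by omega)]
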